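-- pv_equiv track=rewrite | github.com/krushi-11/RDT-Implementation | util.py | sum_of_words
-- ===== SOURCE A (Python) =====
-- def sum_of_words(packet):
--     #grouping the packet into 16bits
--     packet_array = list(packet) #converts packet into list
--     sum = 0 # setting value to 0
--     for i in range(0, len(packet_array), 2): #loop for packet array with spacing of 2, to group the bytes into 16bit words
--         w1 = packet_array[i] & 0xFF # storing the first 8 bits
--         w1 = w1 << 8 #this shifts 8 bits of w1
--         w2 = 0 #initialize to 0
--         if i + 1 < len(packet_array): #checks if there is another byte available for second byte
--             w2 = packet_array[i + 1] & 0xFF #if available it stores it in w2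
--             sum += w1 + w2 #total
--
--     ## substringing because bin() returns string with 0b prefixed
--     sum = bin(sum)[2:] #converts decimal sum to binary string and [2:] is used to remove 0b
--     return sum
-- ===== SOURCE B (Python) =====
-- def sum_of_words(packet):
--     # Linearity: sum of 16-bit words = (sum of high bytes) << 8 + (sum of low bytes),
--     # computed as two strided-slice sums; an unpaired trailing byte is trimmed first.
--     data = list(packet)
--     if len(data) % 2:
--         data = data[:-1]
--     hi = sum(b & 0xFF for b in data[::2])
--     lo = sum(b & 0xFF for b in data[1::2])
--     return bin((hi << 8) + lo)[2:]
-- ===== Notes on version B (the rewrite author's own statement) =====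
-- stated objective: alternative
-- what changed: B uses linearity of the word sum: instead of forming and adding each 16-bit word in an index-stepping loop with a guard, it trims an unpaired trailing byte and computes (sum of high bytes over data[::2]) << 8 plus (sum of low bytes over data[1::2]) from two strided slices, never constructing any word value.
import Mathlib
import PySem

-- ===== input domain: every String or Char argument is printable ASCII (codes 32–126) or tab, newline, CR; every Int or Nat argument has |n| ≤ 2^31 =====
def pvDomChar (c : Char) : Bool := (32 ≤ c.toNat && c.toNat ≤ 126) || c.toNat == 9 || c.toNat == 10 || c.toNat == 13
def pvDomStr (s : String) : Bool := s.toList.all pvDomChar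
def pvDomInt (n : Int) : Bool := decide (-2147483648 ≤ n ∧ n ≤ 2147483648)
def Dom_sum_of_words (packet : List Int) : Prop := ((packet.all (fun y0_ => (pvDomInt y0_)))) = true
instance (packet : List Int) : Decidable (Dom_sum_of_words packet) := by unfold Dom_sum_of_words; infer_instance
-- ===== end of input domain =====

-- B computes the word sum by linearity — (sum of high bytes) << 8 + (sum of low bytes)
-- over two strided slices of the trimmed packet — instead of A's index-stepping loop
-- that forms and adds each 16-bit word (objective: alternative; same cost).


-- ===== PORT A =====
def sum_of_words (packet : List Int) : String :=
  let packet_array := packet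
  let n : Int := packet_array.length
  let sum : Int :=
    (PySem.List.pyRange 0 n 2).foldl (fun sum i =>
      let w1 := PySem.Int.band (PySem.List.pyGetD packet_array i 0) 0xFF
      let w1 := w1 <<< 8
      -- w2 := 0 is folded into the branch: only the if-branch touches sum
      if i + 1 < n then
        let w2 := PySem.Int.band (PySem.List.pyGetD packet_array (i + 1) 0) 0xFF
        sum + (w1 + w2)
      else sum) 0
  PySem.Str.slice (PySem.Int.pyBin sum) (some 2) none

-- ===== PORT B =====
-- data[:-1] trims an unpaired trailing byte; data[::2] / data[1::2] are the
-- high-byte and low-byte strided slices, summed separately and combined.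
def sum_of_words_alt (packet : List Int) : String :=
  let data := packet
  let data := if PySem.Int.mod (PySem.List.len data) 2 ≠ 0
              then PySem.List.slice data none (some (-1)) else data
  let hi := (((PySem.List.slice? data none none 2).getD []).map
              (fun b => PySem.Int.band b 0xFF)).sum
  let lo := (((PySem.List.slice? data (some 1) none 2).getD []).map
              (fun b => PySem.Int.band b 0xFF)).sum
  PySem.Str.slice (PySem.Int.pyBin (hi <<< 8 + lo)) (some 2) none

-- ===== PRECONDITION & SPEC =====
def Spec_sum_of_words (packet : List Int) (out : String) : Prop := out = sum_of_words_alt packet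
instance (packet : List Int) (out : String) : Decidable (Spec_sum_of_words packet out) := by unfold Spec_sum_of_words; infer_instance

-- ===== CLAIM (what is proved, stated in full; the proofs are below) =====
def Claim_equal_sum_of_words : Prop := ∀ (packet : List Int), Dom_sum_of_words packet → Spec_sum_of_words packet (sum_of_words packet)

-- ===== LEMMAS AND PROOFS =====

-- common reference value: the sum of the complete 16-bit words
def pvPairSum : List Int → Int
  | a :: b :: rest => (PySem.Int.band a 0xFF) <<< 8 + PySem.Int.band b 0xFF + pvPairSum rest
  | _ => 0

-- ---- A-side: A's loop sum equals pvPairSum ----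

-- the per-index word contribution of A's loop (0 when the word is incomplete)
def pvWordAt (xs : List Int) (i : Int) : Int :=
  if i + 1 < (xs.length : Int) then
    (PySem.Int.band (PySem.List.pyGetD xs i 0) 0xFF) <<< 8
      + PySem.Int.band (PySem.List.pyGetD xs (i + 1) 0) 0xFF
  else 0

theorem pvSumA_eq_map_sum (xs : List Int) :
    (PySem.List.pyRange 0 (xs.length : Int) 2).foldl (fun sum i =>
      let w1 := PySem.Int.band (PySem.List.pyGetD xs i 0) 0xFF
      let w1 := w1 <<< 8
      if i + 1 < (xs.length : Int) then
        let w2 := PySem.Int.band (PySem.List.pyGetD xs (i + 1) 0) 0xFF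
        sum + (w1 + w2)
      else sum) 0
    = ((PySem.List.pyRange 0 (xs.length : Int) 2).map (pvWordAt xs)).sum := by
  rw [show (fun (sum i : Int) =>
      let w1 := PySem.Int.band (PySem.List.pyGetD xs i 0) 0xFF
      let w1 := w1 <<< 8
      if i + 1 < (xs.length : Int) then
        let w2 := PySem.Int.band (PySem.List.pyGetD xs (i + 1) 0) 0xFF
        sum + (w1 + w2)
      else sum) = (fun sum i => sum + pvWordAt xs i) from ?_,
     PySem.List.foldl_add, zero_add]
  funext s i
  simp only [pvWordAt]
  split <;> simp

-- the number of loop iterations of A, ⌈n/2⌉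
def pvHalf (n : Nat) : Nat := (n + 1) / 2

theorem pvRange_two (n : Nat) :
    PySem.List.pyRange 0 (n : Int) 2 =
      (List.range (pvHalf n)).map (fun k : Nat => (2 * (k : Int))) := by
  rw [PySem.List.pyRange_of_pos 0 (n : Int) (by norm_num)]
  rcases Nat.eq_zero_or_pos n with h | h
  · subst h; simp [pvHalf]
  · have h0 : (0 : Int) < (n : Int) := by exact_mod_cast h
    rw [if_pos h0]
    have hc : (((n : Int) - 0 + 2 - 1) / 2).toNat = pvHalf n := by
      unfold pvHalf; omega
    rw [hc]
    exact List.map_congr_left (fun k _ => by ring)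

theorem pvMapSum_eq_pairSum (xs : List Int) :
    ((List.range (pvHalf xs.length)).map (fun k : Nat => pvWordAt xs (2 * (k : Int)))).sum
      = pvPairSum xs := by
  match xs with
  | [] => simp [pvHalf, pvPairSum]
  | [a] =>
      norm_num [pvHalf, List.range_one, pvWordAt, pvPairSum]
  | a :: b :: rest =>
      have ih := pvMapSum_eq_pairSum rest
      have hh : pvHalf (a :: b :: rest).length = pvHalf rest.length + 1 := by
        simp only [pvHalf, List.length_cons]; omega
      have hlc : ((a :: b :: rest).length : Int) = (rest.length : Int) + 2 := by
        push_cast [List.length_cons]; ring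
      have hw0 : pvWordAt (a :: b :: rest) (2 * ((0 : Nat) : Int)) =
          (PySem.Int.band a 0xFF) <<< 8 + PySem.Int.band b 0xFF := by
        simp [pvWordAt, PySem.List.pyGetD]
      have hshift : ∀ k : Nat,
          pvWordAt (a :: b :: rest) (2 * ((k : Int) + 1)) = pvWordAt rest (2 * (k : Int)) := by
        intro k
        unfold pvWordAt
        have e1 : PySem.List.pyGetD (a :: b :: rest) (2 * ((k : Int) + 1)) 0
            = PySem.List.pyGetD rest (2 * (k : Int)) 0 := by
          have h1 : (2 * ((k : Int) + 1)) = (((2 * k + 2 : Nat) : Int)) := by push_cast; ring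
          have h2 : (2 * (k : Int)) = (((2 * k : Nat) : Int)) := by push_cast; ring
          rw [h1, PySem.List.pyGetD_natCast, h2, PySem.List.pyGetD_natCast]
          simp [List.getD]
        have e2 : PySem.List.pyGetD (a :: b :: rest) (2 * ((k : Int) + 1) + 1) 0
            = PySem.List.pyGetD rest (2 * (k : Int) + 1) 0 := by
          have h1 : (2 * ((k : Int) + 1) + 1) = (((2 * k + 3 : Nat) : Int)) := by push_cast; ring
          have h2 : (2 * (k : Int) + 1) = (((2 * k + 1 : Nat) : Int)) := by push_cast; ring
          rw [h1, PySem.List.pyGetD_natCast, h2, PySem.List.pyGetD_natCast]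
          simp [List.getD]
        rw [e1, e2, hlc]
        by_cases h : 2 * (k : Int) + 1 < (rest.length : Int)
        · rw [if_pos (by omega), if_pos h]
        · rw [if_neg (by omega), if_neg h]
      rw [hh, List.range_succ_eq_map, List.map_cons, List.sum_cons, List.map_map]
      have htail : List.map ((fun k : Nat => pvWordAt (a :: b :: rest) (2 * (k : Int))) ∘ Nat.succ)
            (List.range (pvHalf rest.length))
          = List.map (fun k : Nat => pvWordAt rest (2 * (k : Int))) (List.range (pvHalf rest.length)) := by
        refine List.map_congr_left (fun k _ => ?_)
        show pvWordAt (a :: b :: rest) (2 * ((k.succ : Nat) : Int)) = _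
        have hk : ((k.succ : Nat) : Int) = (k : Int) + 1 := by push_cast; ring
        rw [hk, hshift k]
      rw [htail, ih, hw0]
      simp [pvPairSum]

theorem pvSumA_eq_pairSum (xs : List Int) :
    (PySem.List.pyRange 0 (xs.length : Int) 2).foldl (fun sum i =>
      let w1 := PySem.Int.band (PySem.List.pyGetD xs i 0) 0xFF
      let w1 := w1 <<< 8
      if i + 1 < (xs.length : Int) then
        let w2 := PySem.Int.band (PySem.List.pyGetD xs (i + 1) 0) 0xFF
        sum + (w1 + w2)
      else sum) 0 = pvPairSum xs := by
  rw [pvSumA_eq_map_sum, pvRange_two, List.map_map]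
  exact pvMapSum_eq_pairSum xs

-- ---- B-side: the two strided-slice sums combine to pvPairSum ----

-- the strided slices as maps over index ranges
theorem pvSlice_even (d : List Int) :
    (PySem.List.slice? d none none 2).getD []
      = (List.range (pvHalf d.length)).map (fun k => d.getD (2 * k) 0) := by
  simp only [PySem.List.slice?, PySem.List.sliceIndices]
  norm_num
  have hc : (if 0 < d.length then (((d.length : Int) + 2 - 1) / 2).toNat else 0)
      = pvHalf d.length := by unfold pvHalf; split <;> omega
  rw [hc]
  rw [List.filterMap_congr (g := fun x => some (d.getD (2 * x) 0)) ?_]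
  · exact congrFun List.filterMap_eq_map _
  · intro x hx
    simp only [List.mem_range, pvHalf] at hx
    have h2 : (2 * (x : Int)).toNat = 2 * x := by omega
    rw [h2]
    have hlt : 2 * x < d.length := by omega
    simp [List.getD, List.getElem?_eq_getElem hlt]

theorem pvSlice_odd (d : List Int) :
    (PySem.List.slice? d (some 1) none 2).getD []
      = (List.range (d.length / 2)).map (fun k => d.getD (2 * k + 1) 0) := by
  simp only [PySem.List.slice?, PySem.List.sliceIndices]
  norm_num
  by_cases hn : 2 ≤ d.length
  · have hmin : min 1 (d.length : Int) = 1 := by omega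
    have hc : (if 1 < d.length then (((d.length : Int) - min 1 (d.length : Int) + 2 - 1) / 2).toNat else 0)
        = d.length / 2 := by rw [hmin, if_pos (by omega)]; omega
    rw [hc, hmin]
    rw [List.filterMap_congr (g := fun x => some (d.getD (2 * x + 1) 0)) ?_]
    · exact congrFun List.filterMap_eq_map _
    · intro x hx
      simp only [List.mem_range] at hx
      have h2 : ((1 : Int) + 2 * (x : Int)).toNat = 2 * x + 1 := by omega
      rw [h2]
      have hlt : 2 * x + 1 < d.length := by omega
      simp [List.getD, List.getElem?_eq_getElem hlt]
  · have hc : (if 1 < d.length then (((d.length : Int) - min 1 (d.length : Int) + 2 - 1) / 2).toNat else 0)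
        = 0 := by rw [if_neg (by omega)]
    have hc2 : d.length / 2 = 0 := by omega
    rw [hc, hc2]; rfl

-- x << 8 is x * 256
theorem pvShl8 (x : Int) : x <<< (8:Int) = x * 256 := by
  rw [show (8:Int) = ((8:Nat):Int) by norm_num, Int.shiftLeft_eq_mul_pow]
  norm_num

-- on an even-length list, hi << 8 + lo recombines into the pair sum
theorem pvHiLo_eq_pairSum (d : List Int) (h : d.length % 2 = 0) :
    (((List.range (pvHalf d.length)).map (fun k => PySem.Int.band (d.getD (2 * k) 0) 0xFF)).sum) <<< 8
      + ((List.range (d.length / 2)).map (fun k => PySem.Int.band (d.getD (2 * k + 1) 0) 0xFF)).sum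
      = pvPairSum d := by
  match d with
  | [] => decide
  | [a] => simp at h
  | a :: b :: rest =>
      have hr : rest.length % 2 = 0 := by simp only [List.length_cons] at h; omega
      have ih := pvHiLo_eq_pairSum rest hr
      have hh : pvHalf (a :: b :: rest).length = pvHalf rest.length + 1 := by
        simp only [pvHalf, List.length_cons]; omega
      have hq : (a :: b :: rest).length / 2 = rest.length / 2 + 1 := by
        simp only [List.length_cons]; omega
      rw [hh, hq, List.range_succ_eq_map, List.range_succ_eq_map]
      simp only [List.map_cons, List.sum_cons, List.map_map]
      have he : List.map ((fun k => PySem.Int.band ((a :: b :: rest).getD (2 * k) 0) 0xFF) ∘ Nat.succ)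
            (List.range (pvHalf rest.length))
          = List.map (fun k => PySem.Int.band (rest.getD (2 * k) 0) 0xFF) (List.range (pvHalf rest.length)) := by
        refine List.map_congr_left (fun k _ => ?_)
        show PySem.Int.band ((a :: b :: rest).getD (2 * (k + 1)) 0) 0xFF = _
        have h2 : 2 * (k + 1) = 2 * k + 2 := by ring
        rw [h2]; rfl
      have ho : List.map ((fun k => PySem.Int.band ((a :: b :: rest).getD (2 * k + 1) 0) 0xFF) ∘ Nat.succ)
            (List.range (rest.length / 2))
          = List.map (fun k => PySem.Int.band (rest.getD (2 * k + 1) 0) 0xFF) (List.range (rest.length / 2)) := by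
        refine List.map_congr_left (fun k _ => ?_)
        show PySem.Int.band ((a :: b :: rest).getD (2 * (k + 1) + 1) 0) 0xFF = _
        have h2 : 2 * (k + 1) + 1 = (2 * k + 1) + 2 := by ring
        rw [h2]; rfl
      rw [he, ho]
      show (PySem.Int.band ((a:Int)) 0xFF + _) <<< (8:Int) + (PySem.Int.band (b:Int) 0xFF + _) = _
      rw [pvShl8] at ih ⊢
      show _ = (PySem.Int.band a 0xFF) <<< (8:Int) + PySem.Int.band b 0xFF + pvPairSum rest
      rw [pvShl8]
      linarith [ih]

-- dropping an unpaired trailing byte does not change the pair sum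
theorem pvPairSum_dropLast (xs : List Int) (h : xs.length % 2 = 1) :
    pvPairSum xs.dropLast = pvPairSum xs := by
  match xs with
  | [] => simp at h
  | [a] => rfl
  | a :: b :: rest =>
      have hr : rest.length % 2 = 1 := by simp only [List.length_cons] at h; omega
      have hne : rest ≠ [] := by intro he; rw [he] at hr; simp at hr
      have hd : (a :: b :: rest).dropLast = a :: b :: rest.dropLast := by
        simp [List.dropLast]
      rw [hd]
      show _ + pvPairSum rest.dropLast = _ + pvPairSum rest
      rw [pvPairSum_dropLast rest hr]

-- ===== VERDICT (by name: the statement is the Claim_ definition above) =====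
theorem sum_of_words_spec : Claim_equal_sum_of_words := by
  intro packet _
  unfold Spec_sum_of_words sum_of_words sum_of_words_alt
  simp only [PySem.List.len_eq]
  rw [pvSumA_eq_pairSum]
  by_cases hpar : packet.length % 2 = 0
  · have hcond : ¬ (PySem.Int.mod (packet.length : Int) 2 ≠ 0) := by
      rw [PySem.Int.mod_eq_emod_of_pos (by norm_num)]; omega
    rw [if_neg hcond, pvSlice_even, pvSlice_odd, List.map_map, List.map_map]
    rw [show ((fun b => PySem.Int.band b 0xFF) ∘ fun k => packet.getD (2 * k) 0)
          = fun k => PySem.Int.band (packet.getD (2 * k) 0) 0xFF from rfl]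
    rw [show ((fun b => PySem.Int.band b 0xFF) ∘ fun k => packet.getD (2 * k + 1) 0)
          = fun k => PySem.Int.band (packet.getD (2 * k + 1) 0) 0xFF from rfl]
    rw [pvHiLo_eq_pairSum packet hpar]
  · have hodd : packet.length % 2 = 1 := by omega
    have hcond : (PySem.Int.mod (packet.length : Int) 2 ≠ 0) := by
      rw [PySem.Int.mod_eq_emod_of_pos (by norm_num)]; omega
    rw [if_pos hcond, PySem.List.slice_to_neg_one]
    rw [pvSlice_even, pvSlice_odd, List.map_map, List.map_map]
    rw [show ((fun b => PySem.Int.band b 0xFF) ∘ fun k => packet.dropLast.getD (2 * k) 0)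
          = fun k => PySem.Int.band (packet.dropLast.getD (2 * k) 0) 0xFF from rfl]
    rw [show ((fun b => PySem.Int.band b 0xFF) ∘ fun k => packet.dropLast.getD (2 * k + 1) 0)
          = fun k => PySem.Int.band (packet.dropLast.getD (2 * k + 1) 0) 0xFF from rfl]
    have hev : packet.dropLast.length % 2 = 0 := by
      rw [List.length_dropLast]; omega
    rw [pvHiLo_eq_pairSum packet.dropLast hev, pvPairSum_dropLast packet hodd]
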